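-- pv_equiv track=rewrite | github.com/teslanika/cyber-pilot | .bootstrap/.core/skills/cypilot/scripts/cypilot/commands/kit.py | _marker_identity_key
-- ===== SOURCE A (Python) =====
-- _SINGLETON_MARKERS = frozenset({"blueprint", "skill", "system-prompt", "rules", "checklist"})
--
-- def _marker_identity_key(marker_type: str, raw_content: str, explicit_id: str = "") -> str:
--     """Derive a stable identity key for a marker from its type and TOML data.
--
--     Resolution chain (highest priority first):
--       1. Explicit syntax ID: @cpt:TYPE:ID → "TYPE:ID"
--       2. Singleton markers: blueprint, skill, system-prompt, rules, checklist → TYPE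
--       3. TOML-derived key: heading:{id}, workflow:{name}, id:{kind}
--       4. Positional fallback: TYPE (caller appends #N index)
--     """
--     # 1. Singleton markers — type IS the key
--     if marker_type in _SINGLETON_MARKERS:
--         return marker_type
--
--     # 2. Explicit syntax ID (highest priority for non-singletons)
--     if explicit_id:
--         return f"{marker_type}:{explicit_id}"
--
--     # 3. TOML-derived key
--     # Quick TOML key extraction without full parser
--     def _toml_val(key: str) -> str:
--         for line in raw_content.splitlines():
--             stripped = line.strip()
--             if (stripped.startswith(f"{key} ") or stripped.startswith(f"{key}=")) and "=" in stripped: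
--                 _, _, val = stripped.partition("=")
--                 return val.strip().strip('"').strip("'")
--         return ""
--
--     if marker_type == "workflow":
--         name = _toml_val("name")
--         return f"workflow:{name}" if name else "workflow"
--     if marker_type == "heading":
--         hid = _toml_val("id")
--         if hid:
--             return f"heading:{hid}"
--         level = _toml_val("level")
--         return f"heading:L{level}" if level else "heading"
--     if marker_type == "id":
--         kind = _toml_val("kind")
--         return f"id:{kind}" if kind else "id"
--
--     # 4. Fallback to type (caller appends positional index)
--     return marker_type
-- ===== SOURCE B (Python) =====
-- def _extract_val(stripped):
--     val = stripped.partition("=")[2]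
--     return val.strip().strip('"').strip("'")
--
--
-- def _marker_identity_key(marker_type: str, raw_content: str, explicit_id: str = "") -> str:
--     if marker_type in ("blueprint", "skill", "system-prompt", "rules", "checklist"):
--         return marker_type
--     if explicit_id:
--         return f"{marker_type}:{explicit_id}"
--
--     # Single pass: collect the first match for each target key at once.
--     name_v = id_v = level_v = kind_v = None
--     for line in raw_content.splitlines():
--         stripped = line.strip()
--         if "=" not in stripped:
--             continue
--         if name_v is None and (stripped.startswith("name ") or stripped.startswith("name=")):
--             name_v = _extract_val(stripped)
--         if id_v is None and (stripped.startswith("id ") or stripped.startswith("id=")):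
--             id_v = _extract_val(stripped)
--         if level_v is None and (stripped.startswith("level ") or stripped.startswith("level=")):
--             level_v = _extract_val(stripped)
--         if kind_v is None and (stripped.startswith("kind ") or stripped.startswith("kind=")):
--             kind_v = _extract_val(stripped)
--
--     if marker_type == "workflow":
--         return f"workflow:{name_v}" if name_v else "workflow"
--     if marker_type == "heading":
--         if id_v:
--             return f"heading:{id_v}"
--         return f"heading:L{level_v}" if level_v else "heading"
--     if marker_type == "id":
--         return f"id:{kind_v}" if kind_v else "id"
--     return marker_type
-- ===== Notes on version B (the rewrite author's own statement) =====
-- stated objective: alternative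
-- what changed: A rescans raw_content.splitlines() lazily once per TOML key (_toml_val called up to twice per type); B makes a single pass over the lines collecting the first match for all four keys (name, id, level, kind) at once, then resolves from those collected values.
import Mathlib
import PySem

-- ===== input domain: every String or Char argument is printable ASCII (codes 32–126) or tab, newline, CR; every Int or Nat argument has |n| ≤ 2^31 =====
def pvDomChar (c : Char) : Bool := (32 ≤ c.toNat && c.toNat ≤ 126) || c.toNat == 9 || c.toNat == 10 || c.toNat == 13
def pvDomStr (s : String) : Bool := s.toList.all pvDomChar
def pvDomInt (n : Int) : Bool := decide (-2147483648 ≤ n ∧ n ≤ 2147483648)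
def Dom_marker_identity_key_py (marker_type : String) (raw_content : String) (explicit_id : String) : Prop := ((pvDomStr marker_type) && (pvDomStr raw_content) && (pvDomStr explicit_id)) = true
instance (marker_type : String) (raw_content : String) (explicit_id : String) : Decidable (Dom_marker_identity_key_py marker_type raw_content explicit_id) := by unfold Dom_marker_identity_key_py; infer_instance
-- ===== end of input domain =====

-- B replaces A's four lazy per-key rescans of raw_content with ONE pass that collects the
-- first match for all four TOML keys at once (objective: alternative decomposition, same results).

-- ===== PORT A =====

-- val.strip().strip('"').strip("'")
def pvStripQ (v : List Char) : List Char :=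
  PySem.Chars.stripChars (PySem.Chars.stripChars (PySem.Chars.strip v) ['"']) ['\'']

-- stripped.partition("=") third component: hand port, exact ("" when '=' absent, else the part after the FIRST '=')
def pvPartVal (s : List Char) : List Char :=
  let i := PySem.Chars.find s ['=']
  if i < 0 then [] else s.drop (i.toNat + 1)

-- A's line condition: (stripped.startswith(key+" ") or stripped.startswith(key+"=")) and "=" in stripped
def pvMatch (key s : List Char) : Bool :=
  (PySem.Chars.startswith s (key ++ [' ']) || PySem.Chars.startswith s (key ++ ['='])) && PySem.Chars.isIn ['='] s

-- A's _toml_val: scan the lines, return the first match's extracted value, else ""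
def pvTomlVal (key : List Char) : List (List Char) → List Char
  | [] => []
  | l :: rest =>
    let stripped := PySem.Chars.strip l
    if pvMatch key stripped then pvStripQ (pvPartVal stripped) else pvTomlVal key rest

def pvSingletons : List String := ["blueprint", "skill", "system-prompt", "rules", "checklist"]

def marker_identity_key_py (marker_type : String) (raw_content : String) (explicit_id : String) : String :=
  if pvSingletons.contains marker_type then marker_type
  else if explicit_id ≠ "" then marker_type ++ ":" ++ explicit_id
  else
    let lines := PySem.Chars.splitlines raw_content.toList
    if marker_type = "workflow" then
      let name := pvTomlVal "name".toList lines
      if name ≠ [] then "workflow:" ++ String.ofList name else "workflow"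
    else if marker_type = "heading" then
      let hid := pvTomlVal "id".toList lines
      if hid ≠ [] then "heading:" ++ String.ofList hid
      else
        let level := pvTomlVal "level".toList lines
        if level ≠ [] then "heading:L" ++ String.ofList level else "heading"
    else if marker_type = "id" then
      let kind := pvTomlVal "kind".toList lines
      if kind ≠ [] then "id:" ++ String.ofList kind else "id"
    else marker_type

-- ===== PORT B =====

-- "if cur is None and (startswith …): cur = _extract_val(stripped)"
def pvUpd (cur : Option (List Char)) (key stripped : List Char) : Option (List Char) :=
  match cur with
  | some v => some v
  | none =>
    if PySem.Chars.startswith stripped (key ++ [' ']) || PySem.Chars.startswith stripped (key ++ ['=']) then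
      some (pvStripQ (pvPartVal stripped))
    else none

-- one loop body of B: skip lines without '=', else offer the line to each of the four slots
def pvStepB (st : Option (List Char) × Option (List Char) × Option (List Char) × Option (List Char))
    (line : List Char) : Option (List Char) × Option (List Char) × Option (List Char) × Option (List Char) :=
  let stripped := PySem.Chars.strip line
  if PySem.Chars.isIn ['='] stripped = false then st
  else
    (pvUpd st.1 "name".toList stripped, pvUpd st.2.1 "id".toList stripped,
     pvUpd st.2.2.1 "level".toList stripped, pvUpd st.2.2.2 "kind".toList stripped)

def marker_identity_key_py_alt (marker_type : String) (raw_content : String) (explicit_id : String) : String :=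
  if ["blueprint", "skill", "system-prompt", "rules", "checklist"].contains marker_type then marker_type
  else if explicit_id ≠ "" then marker_type ++ ":" ++ explicit_id
  else
    let st := (PySem.Chars.splitlines raw_content.toList).foldl pvStepB (none, none, none, none)
    if marker_type = "workflow" then
      match st.1 with
      | some v => if v.isEmpty then "workflow" else "workflow:" ++ String.ofList v
      | none => "workflow"
    else if marker_type = "heading" then
      match st.2.1 with
      | some v =>
        if v.isEmpty then
          match st.2.2.1 with
          | some w => if w.isEmpty then "heading" else "heading:L" ++ String.ofList w
          | none => "heading"
        else "heading:" ++ String.ofList v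
      | none =>
        match st.2.2.1 with
        | some w => if w.isEmpty then "heading" else "heading:L" ++ String.ofList w
        | none => "heading"
    else if marker_type = "id" then
      match st.2.2.2 with
      | some v => if v.isEmpty then "id" else "id:" ++ String.ofList v
      | none => "id"
    else marker_type

-- ===== PRECONDITION & SPEC =====
def Spec_marker_identity_key_py (marker_type : String) (raw_content : String) (explicit_id : String) (out : String) : Prop := out = marker_identity_key_py_alt marker_type raw_content explicit_id
instance (marker_type : String) (raw_content : String) (explicit_id : String) (out : String) : Decidable (Spec_marker_identity_key_py marker_type raw_content explicit_id out) := by unfold Spec_marker_identity_key_py; infer_instance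

-- ===== CLAIM (what is proved, stated in full; the proofs are below) =====
def Claim_equal_marker_identity_key_py : Prop := ∀ (marker_type : String) (raw_content : String) (explicit_id : String), Dom_marker_identity_key_py marker_type raw_content explicit_id → Spec_marker_identity_key_py marker_type raw_content explicit_id (marker_identity_key_py marker_type raw_content explicit_id)

-- ===== LEMMAS AND PROOFS =====

-- first-match scan, as an Option (proof-only helper)
def pvScanOpt (key : List Char) : List (List Char) → Option (List Char)
  | [] => none
  | l :: rest =>
    let stripped := PySem.Chars.strip l
    if pvMatch key stripped then some (pvStripQ (pvPartVal stripped)) else pvScanOpt key rest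

def pvOr (o x : Option (List Char)) : Option (List Char) :=
  match o with
  | some v => some v
  | none => x

theorem pvOr_upd (cur : Option (List Char)) (key stripped : List Char) (rest : List (List Char))
    (h : PySem.Chars.isIn ['='] stripped = true) :
    pvOr (pvUpd cur key stripped) (pvScanOpt key rest) =
      pvOr cur (if pvMatch key stripped then some (pvStripQ (pvPartVal stripped)) else pvScanOpt key rest) := by
  cases cur with
  | some v => rfl
  | none =>
    simp only [pvUpd, pvMatch, h, Bool.and_true]
    split <;> rfl

theorem foldB_eq (lines : List (List Char))
    (st : Option (List Char) × Option (List Char) × Option (List Char) × Option (List Char)) :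
    lines.foldl pvStepB st =
      (pvOr st.1 (pvScanOpt "name".toList lines), pvOr st.2.1 (pvScanOpt "id".toList lines),
       pvOr st.2.2.1 (pvScanOpt "level".toList lines), pvOr st.2.2.2 (pvScanOpt "kind".toList lines)) := by
  induction lines generalizing st with
  | nil =>
    obtain ⟨a, b, c, d⟩ := st
    cases a <;> cases b <;> cases c <;> cases d <;> rfl
  | cons l rest ih =>
    simp only [List.foldl_cons, ih, pvScanOpt, pvStepB]
    by_cases h : PySem.Chars.isIn ['='] (PySem.Chars.strip l) = true
    · simp only [h, Bool.true_eq_false, if_false]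
      simp only [pvOr_upd _ _ _ _ h]
    · rw [Bool.not_eq_true] at h
      simp only [h, if_true, pvMatch, Bool.and_false, Bool.false_eq_true, if_false]

theorem pvTomlVal_eq (key : List Char) (lines : List (List Char)) :
    pvTomlVal key lines = (pvScanOpt key lines).getD [] := by
  induction lines with
  | nil => rfl
  | cons l rest ih =>
    simp only [pvTomlVal, pvScanOpt]
    split
    · rfl
    · exact ih

theorem branch_eq (pre0 pre : String) (o : Option (List Char)) :
    (if (o.getD []) ≠ [] then pre ++ String.ofList (o.getD []) else pre0) =
      (match o with
       | some v => if v.isEmpty then pre0 else pre ++ String.ofList v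
       | none => pre0) := by
  cases o with
  | none => simp
  | some v => cases v <;> simp

-- ===== VERDICT (by name: the statement is the Claim_ definition above) =====
theorem marker_identity_key_py_spec : Claim_equal_marker_identity_key_py := by
  intro mt rc eid _
  show marker_identity_key_py mt rc eid = marker_identity_key_py_alt mt rc eid
  simp only [marker_identity_key_py, marker_identity_key_py_alt, pvSingletons, foldB_eq,
    pvTomlVal_eq, pvOr, branch_eq]
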